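-- pv_equiv track=rewrite | github.com/yenmr/TISCalling | script/CDS_util.py | find_upstream_start_and_stop_codons
-- ===== SOURCE A (Python) =====
-- stop_codons = ['TAG', 'TAA', 'TGA']
--
-- start_codon = 'ATG'
--
-- def find_upstream_start_and_stop_codons(seq, site):
--     seq_len = len(seq)
--     upstream_start_codon_length = 200
--     upstream_stop_codon_length = 200
--
--     # Search for the closest upstream start codon
--     for i in range(site - 3, -1, -1):
--         codon = seq[i:i+3]
--         #ic(i, codon, start_codon)
--         if codon == start_codon:
--             upstream_start_codon_length = site - i
--             break
--
--     # Search for the closest upstream stop codon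
--     for i in range(site - 3, -1, -1):
--         codon = seq[i:i+3]
--
--         #ic(i, codon, stop_codons)
--         if codon in stop_codons:
--             upstream_stop_codon_length = site - i
--             break
--
--     return upstream_start_codon_length, upstream_stop_codon_length
-- ===== SOURCE B (Python) =====
-- stop_codons = ['TAG', 'TAA', 'TGA']
--
-- start_codon = 'ATG'
--
-- def find_upstream_start_and_stop_codons(seq, site):
--     # Single backward pass maintaining both answers, instead of two scans.
--     start_len = 200
--     stop_len = 200
--     found_start = False
--     found_stop = False
--     for i in range(site - 3, -1, -1):
--         codon = seq[i:i+3]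
--         if not found_start and codon == start_codon:
--             start_len = site - i
--             found_start = True
--         if not found_stop and codon in stop_codons:
--             stop_len = site - i
--             found_stop = True
--         if found_start and found_stop:
--             break
--     return start_len, stop_len
-- ===== Notes on version B (the rewrite author's own statement) =====
-- stated objective: alternative
-- what changed: A makes two independent backward scans over the upstream region (one for the start codon, one for stop codons); B makes a single backward pass that maintains both distances with found-flags and breaks as soon as both are found.
import Mathlib
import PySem

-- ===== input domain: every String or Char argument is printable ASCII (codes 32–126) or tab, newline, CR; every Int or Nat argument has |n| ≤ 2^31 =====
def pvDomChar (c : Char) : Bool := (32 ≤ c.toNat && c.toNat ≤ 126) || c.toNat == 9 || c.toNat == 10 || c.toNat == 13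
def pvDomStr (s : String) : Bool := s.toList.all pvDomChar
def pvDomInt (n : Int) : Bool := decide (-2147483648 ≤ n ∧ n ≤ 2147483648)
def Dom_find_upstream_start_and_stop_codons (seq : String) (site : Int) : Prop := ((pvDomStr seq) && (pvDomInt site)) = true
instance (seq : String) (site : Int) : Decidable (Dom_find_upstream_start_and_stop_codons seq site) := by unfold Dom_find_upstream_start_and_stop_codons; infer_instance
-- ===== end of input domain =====

-- B replaces A's two independent backward scans by one fused backward pass with found-flags; objective: alternative (same cost).

-- ===== PORT A =====
def pvStopCodons : List String := ["TAG", "TAA", "TGA"]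

def pvStartCodon : String := "ATG"

-- first backward loop of A: closest upstream start codon
def pvLoopStart (seq : String) (site : Int) : List Int → Int
  | [] => 200
  | i :: rest =>
    if PySem.Str.slice seq (some i) (some (i + 3)) == pvStartCodon then site - i
    else pvLoopStart seq site rest

-- second backward loop of A: closest upstream stop codon
def pvLoopStop (seq : String) (site : Int) : List Int → Int
  | [] => 200
  | i :: rest =>
    if PySem.Str.slice seq (some i) (some (i + 3)) ∈ pvStopCodons then site - i
    else pvLoopStop seq site rest

def find_upstream_start_and_stop_codons (seq : String) (site : Int) : Int × Int :=
  let _seq_len := PySem.Str.len seq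
  let idxs := PySem.List.pyRange (site - 3) (-1) (-1)
  (pvLoopStart seq site idxs, pvLoopStop seq site idxs)

-- ===== PORT B =====
-- B's single fused backward pass, carrying both lengths and found-flags; breaks when both are found
def pvFused (seq : String) (site : Int) :
    List Int → Int → Int → Bool → Bool → Int × Int
  | [], startLen, stopLen, _, _ => (startLen, stopLen)
  | i :: rest, startLen, stopLen, foundStart, foundStop =>
    let codon := PySem.Str.slice seq (some i) (some (i + 3))
    let (startLen, foundStart) :=
      if !foundStart && codon == "ATG" then (site - i, true) else (startLen, foundStart)
    let (stopLen, foundStop) :=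
      if !foundStop && (codon ∈ (["TAG", "TAA", "TGA"] : List String)) then (site - i, true)
      else (stopLen, foundStop)
    if foundStart && foundStop then (startLen, stopLen)
    else pvFused seq site rest startLen stopLen foundStart foundStop

def find_upstream_start_and_stop_codons_alt (seq : String) (site : Int) : Int × Int :=
  pvFused seq site (PySem.List.pyRange (site - 3) (-1) (-1)) 200 200 false false

-- ===== PRECONDITION & SPEC =====
def Spec_find_upstream_start_and_stop_codons (seq : String) (site : Int) (out : Int × Int) : Prop := out = find_upstream_start_and_stop_codons_alt seq site
instance (seq : String) (site : Int) (out : Int × Int) : Decidable (Spec_find_upstream_start_and_stop_codons seq site out) := by unfold Spec_find_upstream_start_and_stop_codons; infer_instance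

-- ===== CLAIM (what is proved, stated in full; the proofs are below) =====
def Claim_equal_find_upstream_start_and_stop_codons : Prop := ∀ (seq : String) (site : Int), Dom_find_upstream_start_and_stop_codons seq site → Spec_find_upstream_start_and_stop_codons seq site (find_upstream_start_and_stop_codons seq site)

-- ===== LEMMAS AND PROOFS =====

-- defaulted versions of A's two loops (default replaces the literal 200)
def pvLoopStartD (seq : String) (site : Int) (l : List Int) (d : Int) : Int :=
  match l with
  | [] => d
  | i :: rest =>
    if PySem.Str.slice seq (some i) (some (i + 3)) == pvStartCodon then site - i
    else pvLoopStartD seq site rest d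

def pvLoopStopD (seq : String) (site : Int) (l : List Int) (d : Int) : Int :=
  match l with
  | [] => d
  | i :: rest =>
    if PySem.Str.slice seq (some i) (some (i + 3)) ∈ pvStopCodons then site - i
    else pvLoopStopD seq site rest d

-- Invariant of the fused pass: with pending flags, it returns exactly the pair of the
-- two independent scans, where a set flag freezes its component.
theorem pvFused_eq (seq : String) (site : Int) :
    ∀ (l : List Int) (sl tl : Int) (fs ft : Bool),
      pvFused seq site l sl tl fs ft =
        ((if fs then sl else pvLoopStartD seq site l sl),
         (if ft then tl else pvLoopStopD seq site l tl)) := by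
  intro l
  induction l with
  | nil =>
    intro sl tl fs ft
    simp [pvFused, pvLoopStartD, pvLoopStopD]
  | cons i rest ih =>
    intro sl tl fs ft
    simp only [pvFused, pvLoopStartD, pvLoopStopD]
    cases fs <;> cases ft <;>
      by_cases h1 : PySem.Str.slice seq (some i) (some (i + 3)) == "ATG" <;>
      by_cases h2 : PySem.Str.slice seq (some i) (some (i + 3)) ∈ (["TAG", "TAA", "TGA"] : List String) <;>
      simp [h1, h2, ih, pvStartCodon, pvStopCodons]

theorem pvLoopStartD_eq (seq : String) (site : Int) (l : List Int) :
    pvLoopStartD seq site l 200 = pvLoopStart seq site l := by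
  induction l with
  | nil => rfl
  | cons i rest ih => simp [pvLoopStartD, pvLoopStart, ih]

theorem pvLoopStopD_eq (seq : String) (site : Int) (l : List Int) :
    pvLoopStopD seq site l 200 = pvLoopStop seq site l := by
  induction l with
  | nil => rfl
  | cons i rest ih => simp [pvLoopStopD, pvLoopStop, ih]

-- ===== VERDICT (by name: the statement is the Claim_ definition above) =====
theorem find_upstream_start_and_stop_codons_spec : Claim_equal_find_upstream_start_and_stop_codons := by
  intro seq site _
  unfold Spec_find_upstream_start_and_stop_codons
  unfold find_upstream_start_and_stop_codons find_upstream_start_and_stop_codons_alt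
  rw [pvFused_eq]
  simp [pvLoopStartD_eq, pvLoopStopD_eq]
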